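-- pv_equiv track=rewrite | github.com/mijisu0103/Coding-Test-Practices_KR | 프로그래머스/2/389480. 완전범죄/완전범죄.py | solution
-- ===== SOURCE A (Python) =====
-- def solution(info, n, m):
--     ckpt = {0:0}
--     for x, y in info:
--         n_ckpt = {}
--         for xx, yy in ckpt.items():
--             if xx + x < n:
--                 if xx + x not in n_ckpt or n_ckpt[xx+x] > yy:
--                     n_ckpt[xx + x] = yy
--             if yy + y < m:
--                 if xx not in n_ckpt or n_ckpt[xx] > yy + y:
--                     n_ckpt[xx] = yy + y
--         if n_ckpt:
--             ckpt = n_ckpt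
--         else:
--             return -1
--     return min(ckpt.keys())
-- ===== SOURCE B (Python) =====
-- def solution(info, n, m):
--     # Pareto-frontier DP: keep only non-dominated (a_sum, b_sum) states in a
--     # lexicographically sorted list; per item, merge two sorted candidate lists
--     # and prune dominated states in one skyline pass; answer = first state's a_sum.
--     front = [(0, 0)]
--     for x, y in info:
--         ca = [(a + x, b) for a, b in front if a + x < n]
--         cb = [(a, b + y) for a, b in front if b + y < m]
--         merged = []
--         i = j = 0
--         while i < len(ca) and j < len(cb):
--             if ca[i] <= cb[j]:
--                 merged.append(ca[i]); i += 1
--             else: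
--                 merged.append(cb[j]); j += 1
--         merged.extend(ca[i:])
--         merged.extend(cb[j:])
--         front = []
--         for s in merged:
--             if not front or s[1] < front[-1][1]:
--                 front.append(s)
--         if not front:
--             return -1
--     return front[0][0]
-- ===== Notes on version B (the rewrite author's own statement) =====
-- stated objective: alternative
-- what changed: Replaces A's dict DP (one entry per distinct A-sum key storing the minimal B-sum) with a Pareto-frontier DP: a lexicographically sorted list of non-dominated (A-sum,B-sum) states updated per item by a two-pointer merge of two sorted candidate lists plus a skyline dominance prune, the answer read off as the first frontier element's A-sum instead of min over dict keys.
import Mathlib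
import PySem

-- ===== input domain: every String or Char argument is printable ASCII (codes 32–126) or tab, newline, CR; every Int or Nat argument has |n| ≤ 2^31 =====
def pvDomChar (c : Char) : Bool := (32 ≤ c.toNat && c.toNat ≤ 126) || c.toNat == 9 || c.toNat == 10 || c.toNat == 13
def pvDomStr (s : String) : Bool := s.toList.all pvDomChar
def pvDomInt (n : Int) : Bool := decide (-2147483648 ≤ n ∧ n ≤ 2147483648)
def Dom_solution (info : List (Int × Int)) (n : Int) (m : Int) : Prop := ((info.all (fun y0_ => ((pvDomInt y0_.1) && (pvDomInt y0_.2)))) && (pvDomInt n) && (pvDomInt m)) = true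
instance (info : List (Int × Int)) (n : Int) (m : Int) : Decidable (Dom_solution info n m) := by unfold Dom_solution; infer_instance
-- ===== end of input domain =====

-- B replaces A's dict DP (one entry per A-sum, min B-sum) by a sorted Pareto-frontier list
-- updated by a two-pointer merge and a skyline prune; the return value is proved equal.

-- ===== PORT A =====
-- "if k not in d or d[k] > v: d[k] = v"
def aIns (d : PySem.Dict Int Int) (k v : Int) : PySem.Dict Int Int :=
  match d.get? k with
  | none => d.insert k v
  | some w => if w > v then d.insert k v else d

-- the body of A's inner loop over ckpt.items()
def aBody (n m x y : Int) (d : PySem.Dict Int Int) (p : Int × Int) : PySem.Dict Int Int :=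
  let d1 := if p.1 + x < n then aIns d (p.1 + x) p.2 else d
  if p.2 + y < m then aIns d1 p.1 (p.2 + y) else d1

def aStep (n m x y : Int) (ckpt : PySem.Dict Int Int) : PySem.Dict Int Int :=
  ckpt.items.foldl (aBody n m x y) PySem.Dict.empty

def aLoop (n m : Int) (items : List (Int × Int)) (ckpt : PySem.Dict Int Int) :
    Option (PySem.Dict Int Int) :=
  match items with
  | [] => some ckpt
  | (x, y) :: rest =>
    let nc := aStep n m x y ckpt
    if nc.items = [] then none else aLoop n m rest nc

-- "return min(ckpt.keys())" / the early "return -1"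
def aFin : Option (PySem.Dict Int Int) → Int
  | none => -1
  | some d => (PySem.List.min? d.keys (fun k => k)).getD 0

def solution (info : List (Int × Int)) (n : Int) (m : Int) : Int :=
  aFin (aLoop n m info (PySem.Dict.ofList [(0, 0)]))

-- ===== PORT B =====
-- Python tuple comparison "ca[i] <= cb[j]"
def lexLe (p q : Int × Int) : Bool :=
  decide (p.1 < q.1 ∨ (p.1 = q.1 ∧ p.2 ≤ q.2))

-- the two-pointer merge loop (plus the two extends)
def bMerge : List (Int × Int) → List (Int × Int) → List (Int × Int)
  | [], r => r
  | p :: l, [] => p :: l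
  | p :: l, q :: r =>
    if lexLe p q then p :: bMerge l (q :: r) else q :: bMerge (p :: l) r
termination_by l r => l.length + r.length

-- the body of the skyline-prune loop: "if not front or s[1] < front[-1][1]: front.append(s)"
def bPruneStep (out : List (Int × Int)) (s : Int × Int) : List (Int × Int) :=
  match out.getLast? with
  | none => out ++ [s]
  | some t => if s.2 < t.2 then out ++ [s] else out

-- one iteration of B's outer loop: candidate lists, merge, prune
def bStep (n m x y : Int) (front : List (Int × Int)) : List (Int × Int) :=
  let ca := front.filterMap (fun p => if p.1 + x < n then some (p.1 + x, p.2) else none)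
  let cb := front.filterMap (fun p => if p.2 + y < m then some (p.1, p.2 + y) else none)
  (bMerge ca cb).foldl bPruneStep []

def bLoop (n m : Int) : List (Int × Int) → List (Int × Int) → Option (List (Int × Int))
  | [], front => some front
  | (x, y) :: rest, front =>
    let f' := bStep n m x y front
    if f' = [] then none else bLoop n m rest f'

-- "return front[0][0]" / the early "return -1"; front is nonempty whenever the loop finishes
def bFin : Option (List (Int × Int)) → Int
  | none => -1
  | some front => (front.headD (0, 0)).1

def solution_alt (info : List (Int × Int)) (n : Int) (m : Int) : Int :=
  bFin (bLoop n m info [(0, 0)])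

-- ===== PRECONDITION & SPEC =====
def Spec_solution (info : List (Int × Int)) (n : Int) (m : Int) (out : Int) : Prop := out = solution_alt info n m
instance (info : List (Int × Int)) (n : Int) (m : Int) (out : Int) : Decidable (Spec_solution info n m out) := by unfold Spec_solution; infer_instance

-- ===== CLAIM (what is proved, stated in full; the proofs are below) =====
def Claim_equal_solution : Prop := ∀ (info : List (Int × Int)) (n : Int) (m : Int), Dom_solution info n m → Spec_solution info n m (solution info n m)

-- ===== LEMMAS AND PROOFS =====

-- ghost model: the list of reachable (A-sum, B-sum) states, with no pruning at all
def contribA (n m x y : Int) (p : Int × Int) : List (Int × Int) :=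
  (if p.1 + x < n then [(p.1 + x, p.2)] else []) ++ (if p.2 + y < m then [(p.1, p.2 + y)] else [])

def gStep (n m x y : Int) (S : List (Int × Int)) : List (Int × Int) :=
  S.flatMap (contribA n m x y)

def addMin (o : Option Int) (v : Int) : Option Int := some (min (o.getD v) v)

-- running minimum of the section {b | (k,b) ∈ S}, seeded with o
def smin (k : Int) : List (Int × Int) → Option Int → Option Int
  | [], o => o
  | p :: t, o => smin k t (if p.1 = k then addMin o p.2 else o)

theorem smin_append (k : Int) (A B : List (Int × Int)) (o : Option Int) :
    smin k (A ++ B) o = smin k B (smin k A o) := by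
  induction A generalizing o with
  | nil => rfl
  | cons p t ih => simp [smin, ih]

theorem smin_none_iff (k : Int) (S : List (Int × Int)) (o : Option Int) :
    smin k S o = none ↔ o = none ∧ ∀ b, (k, b) ∉ S := by
  induction S generalizing o with
  | nil => simp [smin]
  | cons p t ih =>
    rw [smin, ih]
    by_cases hpk : p.1 = k
    · refine iff_of_false ?_ ?_
      · rintro ⟨h, -⟩; simp [hpk, addMin] at h
      · rintro ⟨-, hall⟩
        have hp : ((k : Int), p.2) = p := by
          rcases p with ⟨a, b⟩; simp at hpk; simp [hpk]
        exact hall p.2 (hp ▸ List.mem_cons_self)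
    · have hne : ∀ b : Int, ((k, b) : Int × Int) ≠ p :=
        fun b he => hpk ((congrArg Prod.fst he).symm)
      rw [if_neg hpk]
      constructor
      · rintro ⟨ho, hall⟩
        refine ⟨ho, fun b hb => ?_⟩
        rcases List.mem_cons.mp hb with h | h
        · exact hne b h
        · exact hall b h
      · rintro ⟨ho, hall⟩
        exact ⟨ho, fun b hb => hall b (List.mem_cons_of_mem _ hb)⟩

theorem smin_spec (k : Int) (S : List (Int × Int)) (o : Option Int) (v : Int)
    (h : smin k S o = some v) :
    ((k, v) ∈ S ∨ o = some v) ∧ (∀ b, (k, b) ∈ S → v ≤ b) ∧ (∀ w, o = some w → v ≤ w) := by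
  induction S generalizing o with
  | nil => simp [smin] at h; simp [h]
  | cons p t ih =>
    rw [smin] at h
    obtain ⟨hmem, hle, ho⟩ := ih _ h
    by_cases hpk : p.1 = k
    · have hp : ((k : Int), p.2) = p := by
        rcases p with ⟨a, b⟩; simp at hpk; simp [hpk]
      rw [if_pos hpk] at hmem ho
      have hvmin : v ≤ min (o.getD p.2) p.2 := ho _ rfl
      refine ⟨?_, ?_, ?_⟩
      · rcases hmem with h1 | h1
        · exact Or.inl (List.mem_cons_of_mem _ h1)
        · simp [addMin] at h1
          cases hoc : o with
          | none =>
            simp [hoc] at h1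
            exact Or.inl (by rw [h1] at hp; exact hp ▸ List.mem_cons_self)
          | some w =>
            simp [hoc] at h1
            rcases le_total w p.2 with hw | hw
            · rw [min_eq_left hw] at h1
              exact Or.inr (congrArg some h1)
            · rw [min_eq_right hw] at h1
              exact Or.inl (by rw [h1] at hp; exact hp ▸ List.mem_cons_self)
      · intro b hb
        rcases List.mem_cons.mp hb with h1 | h1
        · have : b = p.2 := congrArg Prod.snd h1
          subst this
          exact le_trans hvmin (min_le_right _ _)
        · exact hle b h1
      · intro w hw
        subst hw
        simp at hvmin
        exact hvmin.1
    · rw [if_neg hpk] at hmem ho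
      refine ⟨?_, ?_, ho⟩
      · rcases hmem with h1 | h1
        · exact Or.inl (List.mem_cons_of_mem _ h1)
        · exact Or.inr h1
      · intro b hb
        rcases List.mem_cons.mp hb with h1 | h1
        · exact absurd ((congrArg Prod.fst h1).symm) hpk
        · exact hle b h1

theorem smin_eq_some (k : Int) (S : List (Int × Int)) (o : Option Int) (v : Int)
    (hmem : (k, v) ∈ S ∨ o = some v) (hle : ∀ b, (k, b) ∈ S → v ≤ b)
    (ho : ∀ w, o = some w → v ≤ w) : smin k S o = some v := by
  induction S generalizing o with
  | nil =>
    rcases hmem with h | h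
    · simp at h
    · simpa [smin] using h
  | cons p t ih =>
    rw [smin]
    by_cases hpk : p.1 = k
    · have hp : ((k : Int), p.2) = p := by
        rcases p with ⟨a, b⟩; simp at hpk; simp [hpk]
      rw [if_pos hpk]
      have hvp2 : v ≤ p.2 := hle p.2 (hp ▸ List.mem_cons_self)
      apply ih
      · rcases hmem with h1 | h1
        · rcases List.mem_cons.mp h1 with h2 | h2
          · have hv : v = p.2 := congrArg Prod.snd h2
            right
            cases hoc : o with
            | none => simp [addMin, hv]
            | some w =>
              have hvw : v ≤ w := ho w hoc
              simp [addMin]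
              rw [min_eq_right (hv ▸ hvw)]
              exact hv.symm
          · exact Or.inl h2
        · right
          have hvw : v ≤ p.2 := hvp2
          simp [addMin, h1]
          omega
      · exact fun b hb => hle b (List.mem_cons_of_mem _ hb)
      · intro w hw
        simp [addMin] at hw
        cases hoc : o with
        | none => simp [hoc] at hw; omega
        | some u =>
          have := ho u hoc
          simp [hoc] at hw
          omega
    · rw [if_neg hpk]
      apply ih
      · rcases hmem with h1 | h1
        · rcases List.mem_cons.mp h1 with h2 | h2
          · exact absurd ((congrArg Prod.fst h2).symm) hpk
          · exact Or.inl h2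
        · exact Or.inr h1
      · exact fun b hb => hle b (List.mem_cons_of_mem _ hb)
      · exact ho

theorem mem_gStep (n m x y : Int) (S : List (Int × Int)) (k b : Int) :
    (k, b) ∈ gStep n m x y S ↔ (k < n ∧ (k - x, b) ∈ S) ∨ (b < m ∧ (k, b - y) ∈ S) := by
  unfold gStep
  rw [List.mem_flatMap]
  constructor
  · rintro ⟨p, hp, hc⟩
    unfold contribA at hc
    rcases List.mem_append.mp hc with h | h
    · split_ifs at h with hc1
      · simp at h
        obtain ⟨hk, hb⟩ := h
        left
        refine ⟨by omega, ?_⟩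
        have : ((k - x : Int), b) = p := by
          rcases p with ⟨a, c⟩; simp at hk hb ⊢; omega
        rw [this]; exact hp
      · simp at h
    · split_ifs at h with hc2
      · simp at h
        obtain ⟨hk, hb⟩ := h
        right
        refine ⟨by omega, ?_⟩
        have : ((k : Int), b - y) = p := by
          rcases p with ⟨a, c⟩; simp at hk hb ⊢; omega
        rw [this]; exact hp
      · simp at h
  · rintro (⟨hk, hmem⟩ | ⟨hb, hmem⟩)
    · refine ⟨(k - x, b), hmem, ?_⟩
      unfold contribA
      apply List.mem_append.mpr
      left
      rw [if_pos (by omega : (k - x : Int) + x < n)]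
      simp
    · refine ⟨(k, b - y), hmem, ?_⟩
      unfold contribA
      apply List.mem_append.mpr
      right
      rw [if_pos (by omega : (b - y : Int) + y < m)]
      simp

-- dict lookup after one conditional min-insert
theorem aIns_get? (d : PySem.Dict Int Int) (k v j : Int) :
    (aIns d k v).get? j = if j = k then addMin (d.get? k) v else d.get? j := by
  unfold aIns
  split
  next h =>
    rw [PySem.Dict.get?_insert, h]
    by_cases hj : j = k <;> simp [hj, addMin]
  next w h =>
    rw [h]
    by_cases hgt : w > v
    · rw [if_pos hgt, PySem.Dict.get?_insert]
      by_cases hj : j = k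
      · rw [if_pos hj, if_pos hj]; simp only [addMin, Option.getD_some]; congr 1; omega
      · rw [if_neg hj, if_neg hj]
    · rw [if_neg hgt]
      by_cases hj : j = k
      · rw [if_pos hj, hj, h]; simp only [addMin, Option.getD_some]; congr 1; omega
      · rw [if_neg hj]

theorem aBody_get? (n m x y : Int) (d : PySem.Dict Int Int) (p : Int × Int) (j : Int) :
    (aBody n m x y d p).get? j = smin j (contribA n m x y p) (d.get? j) := by
  simp only [aBody, contribA]
  by_cases h1 : p.1 + x < n
  · by_cases h2 : p.2 + y < m
    · simp only [if_pos h1, if_pos h2, List.singleton_append]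
      rw [aIns_get?]
      simp only [aIns_get?, smin]
      by_cases hj1 : j = p.1
      · subst hj1
        by_cases hx : x = 0
        · subst hx
          simp
        · simp [hx]
      · have hj1' : ¬ p.1 = j := fun h => hj1 h.symm
        simp only [if_neg hj1, if_neg hj1']
        by_cases hj2 : j = p.1 + x
        · subst hj2
          simp
        · have hj2' : ¬ p.1 + x = j := fun h => hj2 h.symm
          simp [hj2, hj2']
    · simp only [if_pos h1, if_neg h2, List.append_nil]
      rw [aIns_get?]
      simp only [smin]
      by_cases hj2 : j = p.1 + x
      · subst hj2
        simp
      · have hj2' : ¬ p.1 + x = j := fun h => hj2 h.symm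
        simp [hj2, hj2']
  · by_cases h2 : p.2 + y < m
    · simp only [if_neg h1, if_pos h2, List.nil_append]
      rw [aIns_get?]
      simp only [smin]
      by_cases hj1 : j = p.1
      · subst hj1
        simp
      · have hj1' : ¬ p.1 = j := fun h => hj1 h.symm
        simp [hj1, hj1']
    · simp only [if_neg h1, if_neg h2, List.append_nil, smin]

theorem foldA_get? (n m x y : Int) (L : List (Int × Int)) (acc : PySem.Dict Int Int) (j : Int) :
    (L.foldl (aBody n m x y) acc).get? j = smin j (gStep n m x y L) (acc.get? j) := by
  induction L generalizing acc with
  | nil => simp [gStep, smin]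
  | cons p t ih =>
    rw [List.foldl_cons, ih, aBody_get?]
    conv_rhs => rw [gStep, List.flatMap_cons]
    rw [smin_append]
    rfl

theorem aIns_nodup (d : PySem.Dict Int Int) (k v : Int) (h : d.keys.Nodup) :
    (aIns d k v).keys.Nodup := by
  unfold aIns
  split
  · exact PySem.Dict.nodup_keys_insert _ _ _ h
  · split_ifs
    · exact PySem.Dict.nodup_keys_insert _ _ _ h
    · exact h

theorem aBody_nodup (n m x y : Int) (d : PySem.Dict Int Int) (p : Int × Int)
    (h : d.keys.Nodup) : (aBody n m x y d p).keys.Nodup := by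
  simp only [aBody]
  split_ifs <;> first
    | exact aIns_nodup _ _ _ (aIns_nodup _ _ _ h)
    | exact aIns_nodup _ _ _ h
    | exact h

theorem foldA_nodup (n m x y : Int) (L : List (Int × Int)) (acc : PySem.Dict Int Int)
    (h : acc.keys.Nodup) : (L.foldl (aBody n m x y) acc).keys.Nodup := by
  induction L generalizing acc with
  | nil => exact h
  | cons p t ih => exact ih _ (aBody_nodup n m x y acc p h)

theorem aStep_nodup (n m x y : Int) (d : PySem.Dict Int Int) :
    (aStep n m x y d).keys.Nodup :=
  foldA_nodup n m x y d.items PySem.Dict.empty PySem.Dict.nodup_keys_empty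

theorem items_nil_iff (d : PySem.Dict Int Int) :
    d.items = [] ↔ ∀ k, d.get? k = none := by
  constructor
  · intro h k
    rw [PySem.Dict.get?_eq_none_iff_not_mem_keys]
    simp [PySem.Dict.keys, h]
  · intro h
    cases hi : d.items with
    | nil => rfl
    | cons p t =>
      have hp : p ∈ d.items := by rw [hi]; exact List.mem_cons_self
      have hk : p.1 ∈ d.keys := PySem.Dict.mem_keys_of_mem_items _ hp
      have := h p.1
      rw [PySem.Dict.get?_eq_none_iff_not_mem_keys] at this
      exact absurd hk this

theorem smin_items (d : PySem.Dict Int Int) (hnd : d.keys.Nodup) (k : Int) :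
    smin k d.items none = d.get? k := by
  cases h : d.get? k with
  | none =>
    rw [smin_none_iff]
    refine ⟨rfl, fun b hb => ?_⟩
    have hk : k ∈ d.keys := PySem.Dict.mem_keys_of_mem_items _ hb
    rw [PySem.Dict.get?_eq_none_iff_not_mem_keys] at h
    exact h hk
  | some v =>
    apply smin_eq_some
    · exact Or.inl (PySem.Dict.mem_items_of_get?_eq_some _ h)
    · intro b hb
      have := PySem.Dict.get?_of_mem_items _ hb hnd
      rw [h] at this
      simp at this
      omega
    · intro w hw
      simp at hw

theorem smin_total (U : List (Int × Int)) (a c : Int) (hc : (a, c) ∈ U) :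
    ∃ u, smin a U none = some u := by
  cases hu : smin a U none with
  | some u => exact ⟨u, rfl⟩
  | none =>
    rw [smin_none_iff] at hu
    exact absurd hc (hu.2 c)

theorem states_nil_of_smin_none (U : List (Int × Int)) (h : ∀ j, smin j U none = none) :
    U = [] := by
  cases U with
  | nil => rfl
  | cons q t =>
    have hq := h q.1
    rw [smin_none_iff] at hq
    exact absurd (show ((q.1 : Int), q.2) ∈ q :: t by simp) (hq.2 q.2)

-- the section minimum after a ghost step only depends on the section minima before it
theorem gmin_formula (n m x y : Int) (S T : List (Int × Int))
    (h : ∀ j, smin j S none = smin j T none) (k : Int) :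
    smin k (gStep n m x y S) none = smin k (gStep n m x y T) none := by
  cases hS : smin k (gStep n m x y S) none with
  | none =>
    rw [smin_none_iff] at hS
    symm
    rw [smin_none_iff]
    refine ⟨rfl, fun b hb => ?_⟩
    rcases (mem_gStep n m x y T k b).mp hb with ⟨hk, hmem⟩ | ⟨hbm, hmem⟩
    · obtain ⟨u, hu⟩ := smin_total T (k - x) b hmem
      have huS : smin (k - x) S none = some u := by rw [h (k - x)]; exact hu
      obtain ⟨hmemS, -, -⟩ := smin_spec _ _ _ _ huS
      rcases hmemS with hmS | hF
      · exact hS.2 u ((mem_gStep n m x y S k u).mpr (Or.inl ⟨hk, hmS⟩))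
      · simp at hF
    · obtain ⟨u, hu⟩ := smin_total T k (b - y) hmem
      obtain ⟨-, hleT, -⟩ := smin_spec _ _ _ _ hu
      have huby : u ≤ b - y := hleT _ hmem
      have huS : smin k S none = some u := by rw [h k]; exact hu
      obtain ⟨hmemS, -, -⟩ := smin_spec _ _ _ _ huS
      rcases hmemS with hmS | hF
      · refine hS.2 (u + y) ((mem_gStep n m x y S k (u + y)).mpr (Or.inr ⟨by omega, ?_⟩))
        rw [show u + y - y = u by ring]
        exact hmS
      · simp at hF
  | some v =>
    obtain ⟨hmemv, hminv, -⟩ := smin_spec _ _ _ _ hS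
    rcases hmemv with hmemv | hF
    swap
    · simp at hF
    refine (smin_eq_some _ _ _ _ ?_ ?_ ?_).symm
    · rcases (mem_gStep n m x y S k v).mp hmemv with ⟨hk, hmS⟩ | ⟨hvm, hmS⟩
      · have h1 : smin (k - x) S none = some v := by
          apply smin_eq_some
          · exact Or.inl hmS
          · exact fun b hb => hminv b ((mem_gStep n m x y S k b).mpr (Or.inl ⟨hk, hb⟩))
          · intro w hw; simp at hw
        have h2 : smin (k - x) T none = some v := by rw [← h (k - x)]; exact h1
        obtain ⟨hmT, -, -⟩ := smin_spec _ _ _ _ h2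
        rcases hmT with hmT | hF
        · exact Or.inl ((mem_gStep n m x y T k v).mpr (Or.inl ⟨hk, hmT⟩))
        · simp at hF
      · obtain ⟨u, hu⟩ := smin_total S k (v - y) hmS
        obtain ⟨hmSu, hminu, -⟩ := smin_spec _ _ _ _ hu
        rcases hmSu with hmSu | hF
        swap
        · simp at hF
        have huvy : u ≤ v - y := hminu (v - y) hmS
        have humem : (k, u + y) ∈ gStep n m x y S := by
          refine (mem_gStep n m x y S k (u + y)).mpr (Or.inr ⟨by omega, ?_⟩)
          rw [show u + y - y = u by ring]
          exact hmSu
        have hvu : v ≤ u + y := hminv _ humem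
        have h2 : smin k T none = some u := by rw [← h k]; exact hu
        obtain ⟨hmT, -, -⟩ := smin_spec _ _ _ _ h2
        rcases hmT with hmT | hF
        swap
        · simp at hF
        refine Or.inl ((mem_gStep n m x y T k v).mpr (Or.inr ⟨hvm, ?_⟩))
        rw [show v - y = u by omega]
        exact hmT
    · intro c hc
      rcases (mem_gStep n m x y T k c).mp hc with ⟨hk, hmT⟩ | ⟨hcm, hmT⟩
      · obtain ⟨u, hu⟩ := smin_total T (k - x) c hmT
        obtain ⟨-, hleT, -⟩ := smin_spec _ _ _ _ hu
        have huc : u ≤ c := hleT _ hmT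
        have huS : smin (k - x) S none = some u := by rw [h (k - x)]; exact hu
        obtain ⟨hmS, -, -⟩ := smin_spec _ _ _ _ huS
        rcases hmS with hmS | hF
        swap
        · simp at hF
        have : v ≤ u := hminv u ((mem_gStep n m x y S k u).mpr (Or.inl ⟨hk, hmS⟩))
        omega
      · obtain ⟨u, hu⟩ := smin_total T k (c - y) hmT
        obtain ⟨-, hleT, -⟩ := smin_spec _ _ _ _ hu
        have huc : u ≤ c - y := hleT _ hmT
        have huS : smin k S none = some u := by rw [h k]; exact hu
        obtain ⟨hmS, -, -⟩ := smin_spec _ _ _ _ huS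
        rcases hmS with hmS | hF
        swap
        · simp at hF
        have : v ≤ u + y := by
          refine hminv (u + y) ((mem_gStep n m x y S k (u + y)).mpr (Or.inr ⟨by omega, ?_⟩))
          rw [show u + y - y = u by ring]
          exact hmS
        omega
    · intro w hw
      simp at hw

-- ========== B-side lemmas: the Pareto frontier ==========

-- lexLe as a Prop
def lexLE (p q : Int × Int) : Prop := p.1 < q.1 ∨ (p.1 = q.1 ∧ p.2 ≤ q.2)

theorem lexLe_iff (p q : Int × Int) : lexLe p q = true ↔ lexLE p q := by
  simp [lexLe, lexLE]

theorem lexLE_trans {p q r : Int × Int} (h1 : lexLE p q) (h2 : lexLE q r) : lexLE p r := by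
  unfold lexLE at *; omega

theorem lexLE_of_not (p q : Int × Int) (h : ¬ lexLe p q = true) : lexLE q p := by
  rw [lexLe_iff] at h; unfold lexLE at *; omega

theorem lexLE_fst {p q : Int × Int} (h : lexLE p q) : p.1 ≤ q.1 := by
  unfold lexLE at h; omega

theorem mem_bMerge (L R : List (Int × Int)) (s : Int × Int) :
    s ∈ bMerge L R ↔ s ∈ L ∨ s ∈ R := by
  fun_induction bMerge L R with
  | case1 r => simp
  | case2 p l => simp
  | case3 p l q r hle ih => simp [List.mem_cons, ih]; tauto
  | case4 p l q r hle ih => simp [List.mem_cons, ih]; tauto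

theorem bMerge_pairwise (L R : List (Int × Int))
    (hL : L.Pairwise lexLE) (hR : R.Pairwise lexLE) :
    (bMerge L R).Pairwise lexLE := by
  fun_induction bMerge L R with
  | case1 r => exact hR
  | case2 p l => exact hL
  | case3 p l q r hle ih =>
    rw [List.pairwise_cons] at hL
    refine List.pairwise_cons.mpr ⟨?_, ih hL.2 hR⟩
    intro t ht
    rcases (mem_bMerge _ _ _).mp ht with h | h
    · exact hL.1 t h
    · rcases List.mem_cons.mp h with h | h
      · subst h; exact (lexLe_iff p t).mp hle
      · exact lexLE_trans ((lexLe_iff p q).mp hle) ((List.pairwise_cons.mp hR).1 t h)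
  | case4 p l q r hle ih =>
    rw [List.pairwise_cons] at hR
    refine List.pairwise_cons.mpr ⟨?_, ih hL hR.2⟩
    have hqp : lexLE q p := lexLE_of_not p q hle
    intro t ht
    rcases (mem_bMerge _ _ _).mp ht with h | h
    · rcases List.mem_cons.mp h with h | h
      · subst h; exact hqp
      · exact lexLE_trans hqp ((List.pairwise_cons.mp hL).1 t h)
    · exact hR.1 t h

-- recursive reference form of the skyline-prune loop
def pruneR : List (Int × Int) → Option Int → List (Int × Int)
  | [], _ => []
  | s :: t, none => s :: pruneR t (some s.2)
  | s :: t, some b0 => if s.2 < b0 then s :: pruneR t (some s.2) else pruneR t (some b0)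

theorem foldl_prune (M : List (Int × Int)) :
    ∀ out : List (Int × Int),
      M.foldl bPruneStep out = out ++ pruneR M (out.getLast?.map Prod.snd) := by
  induction M with
  | nil => intro out; simp [pruneR]
  | cons s t ih =>
    intro out
    rw [List.foldl_cons, ih]
    cases hlast : out.getLast? with
    | none =>
      have hout : out = [] := List.getLast?_eq_none_iff.mp hlast
      subst hout
      simp [bPruneStep, pruneR]
    | some tl =>
      simp only [bPruneStep, hlast, Option.map_some, pruneR]
      by_cases hc : s.2 < tl.2
      · rw [if_pos hc, if_pos hc, List.getLast?_concat]
        simp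
      · rw [if_neg hc, if_neg hc, hlast]
        rfl

theorem pruneR_sublist (M : List (Int × Int)) (lb : Option Int) :
    (pruneR M lb).Sublist M := by
  induction M generalizing lb with
  | nil => simp [pruneR]
  | cons s t ih =>
    cases lb with
    | none => exact List.Sublist.cons₂ s (ih (some s.2))
    | some b0 =>
      simp only [pruneR]
      by_cases hc : s.2 < b0
      · rw [if_pos hc]; exact List.Sublist.cons₂ s (ih (some s.2))
      · rw [if_neg hc]; exact List.Sublist.cons s (ih (some b0))

theorem mem_pruneR (M : List (Int × Int)) (lb : Option Int) (t : Int × Int)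
    (h : t ∈ pruneR M lb) : t ∈ M := (pruneR_sublist M lb).mem h

theorem pruneR_pairwise (M : List (Int × Int)) (lb : Option Int) (hM : M.Pairwise lexLE) :
    (pruneR M lb).Pairwise lexLE := hM.sublist (pruneR_sublist M lb)

theorem pruneR_cover (M : List (Int × Int)) (hM : M.Pairwise lexLE) :
    ∀ lb, ∀ s ∈ M,
      (∃ t ∈ pruneR M lb, t.1 ≤ s.1 ∧ t.2 ≤ s.2) ∨ (∃ b0, lb = some b0 ∧ b0 ≤ s.2) := by
  induction M with
  | nil => intro lb s hs; simp at hs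
  | cons p t ih =>
    rw [List.pairwise_cons] at hM
    intro lb s hs
    have keep : ∀ (res : List (Int × Int)), res = p :: pruneR t (some p.2) →
        pruneR (p :: t) lb = res →
        (∃ u ∈ pruneR (p :: t) lb, u.1 ≤ s.1 ∧ u.2 ≤ s.2) ∨
          (∃ b0, lb = some b0 ∧ b0 ≤ s.2) := by
      intro res hres hpr
      rw [hpr, hres]
      rcases List.mem_cons.mp hs with h | h
      · exact Or.inl ⟨p, List.mem_cons_self, by simp [h], by simp [h]⟩
      · rcases ih hM.2 (some p.2) s h with ⟨u, hu, hle⟩ | ⟨b0, hb0, hble⟩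
        · exact Or.inl ⟨u, List.mem_cons_of_mem _ hu, hle⟩
        · have hps : lexLE p s := hM.1 s h
          have hb : p.2 = b0 := by injection hb0
          exact Or.inl ⟨p, List.mem_cons_self, lexLE_fst hps, by rw [hb]; exact hble⟩
    cases lb with
    | none => exact keep _ rfl rfl
    | some b0 =>
      by_cases hc : p.2 < b0
      · exact keep _ rfl (by simp [pruneR, hc])
      · have hpr : pruneR (p :: t) (some b0) = pruneR t (some b0) := by
          simp [pruneR, hc]
        rcases List.mem_cons.mp hs with h | h
        · subst h
          exact Or.inr ⟨b0, rfl, by omega⟩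
        · rcases ih hM.2 (some b0) s h with ⟨u, hu, hle⟩ | hr
          · exact Or.inl ⟨u, by rw [hpr]; exact hu, hle⟩
          · exact Or.inr hr

-- candidate-list membership and sortedness
theorem mem_candA (n x : Int) (F : List (Int × Int)) (s : Int × Int) :
    s ∈ F.filterMap (fun p => if p.1 + x < n then some (p.1 + x, p.2) else none) ↔
      ∃ p ∈ F, p.1 + x < n ∧ s = (p.1 + x, p.2) := by
  rw [List.mem_filterMap]
  constructor
  · rintro ⟨p, hp, h⟩
    split_ifs at h with hc
    exact ⟨p, hp, hc, (Option.some_inj.mp h).symm⟩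
  · rintro ⟨p, hp, hc, hs⟩
    exact ⟨p, hp, by rw [if_pos hc, hs]⟩

theorem mem_candB (m y : Int) (F : List (Int × Int)) (s : Int × Int) :
    s ∈ F.filterMap (fun p => if p.2 + y < m then some (p.1, p.2 + y) else none) ↔
      ∃ p ∈ F, p.2 + y < m ∧ s = (p.1, p.2 + y) := by
  rw [List.mem_filterMap]
  constructor
  · rintro ⟨p, hp, h⟩
    split_ifs at h with hc
    exact ⟨p, hp, hc, (Option.some_inj.mp h).symm⟩
  · rintro ⟨p, hp, hc, hs⟩
    exact ⟨p, hp, by rw [if_pos hc, hs]⟩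

theorem candA_pairwise (n x : Int) (F : List (Int × Int)) (hF : F.Pairwise lexLE) :
    (F.filterMap (fun p => if p.1 + x < n then some (p.1 + x, p.2) else none)).Pairwise lexLE := by
  rw [List.pairwise_filterMap]
  refine hF.imp_of_mem ?_
  intro p q hp hq h a ha b hb
  split_ifs at ha hb
  simp at ha hb
  subst ha; subst hb
  unfold lexLE at *; simp; omega

theorem candB_pairwise (m y : Int) (F : List (Int × Int)) (hF : F.Pairwise lexLE) :
    (F.filterMap (fun p => if p.2 + y < m then some (p.1, p.2 + y) else none)).Pairwise lexLE := by
  rw [List.pairwise_filterMap]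
  refine hF.imp_of_mem ?_
  intro p q hp hq h a ha b hb
  split_ifs at ha hb
  simp at ha hb
  subst ha; subst hb
  unfold lexLE at *; simp; omega

-- one step preserves the frontier invariants w.r.t. the ghost state set
theorem bStep_inv (n m x y : Int) (U F : List (Int × Int))
    (hsub : ∀ f ∈ F, f ∈ U)
    (hcov : ∀ u ∈ U, ∃ f ∈ F, f.1 ≤ u.1 ∧ f.2 ≤ u.2)
    (hsort : F.Pairwise lexLE) :
    (∀ f ∈ bStep n m x y F, f ∈ gStep n m x y U) ∧
    (∀ u ∈ gStep n m x y U, ∃ f ∈ bStep n m x y F, f.1 ≤ u.1 ∧ f.2 ≤ u.2) ∧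
    (bStep n m x y F).Pairwise lexLE := by
  unfold bStep
  set ca := F.filterMap (fun p => if p.1 + x < n then some (p.1 + x, p.2) else none) with hca
  set cb := F.filterMap (fun p => if p.2 + y < m then some (p.1, p.2 + y) else none) with hcb
  have hM : (bMerge ca cb).Pairwise lexLE :=
    bMerge_pairwise ca cb (candA_pairwise n x F hsort) (candB_pairwise m y F hsort)
  rw [foldl_prune]
  simp only [List.getLast?_nil, Option.map_none, List.nil_append]
  have hmem_merged : ∀ s ∈ bMerge ca cb, s ∈ gStep n m x y U := by
    intro s hsm
    rcases (mem_bMerge ca cb s).mp hsm with h | h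
    · obtain ⟨p, hp, hc, hs⟩ := (mem_candA n x F s).mp h
      subst hs
      refine (mem_gStep n m x y U (p.1 + x) p.2).mpr (Or.inl ⟨by omega, ?_⟩)
      rw [show p.1 + x - x = p.1 by ring, Prod.mk.eta]
      exact hsub p hp
    · obtain ⟨p, hp, hc, hs⟩ := (mem_candB m y F s).mp h
      subst hs
      refine (mem_gStep n m x y U p.1 (p.2 + y)).mpr (Or.inr ⟨by omega, ?_⟩)
      rw [show p.2 + y - y = p.2 by ring, Prod.mk.eta]
      exact hsub p hp
  refine ⟨?_, ?_, pruneR_pairwise _ _ hM⟩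
  · intro f hf
    exact hmem_merged f (mem_pruneR _ _ _ hf)
  · intro u hu
    have hcand : ∃ s ∈ bMerge ca cb, s.1 ≤ u.1 ∧ s.2 ≤ u.2 := by
      rcases (mem_gStep n m x y U u.1 u.2).mp (by rw [Prod.mk.eta]; exact hu) with
        ⟨hk, hmem⟩ | ⟨hb, hmem⟩
      · obtain ⟨f, hf, hle1, hle2⟩ := hcov _ hmem
        refine ⟨(f.1 + x, f.2), (mem_bMerge ca cb _).mpr (Or.inl ?_), by simpa using by omega,
          by simpa using hle2⟩
        exact (mem_candA n x F _).mpr ⟨f, hf, by omega, rfl⟩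
      · obtain ⟨f, hf, hle1, hle2⟩ := hcov _ hmem
        refine ⟨(f.1, f.2 + y), (mem_bMerge ca cb _).mpr (Or.inr ?_), by simpa using hle1,
          by simpa using by omega⟩
        exact (mem_candB m y F _).mpr ⟨f, hf, by omega, rfl⟩
    obtain ⟨s, hsm, hs1, hs2⟩ := hcand
    rcases pruneR_cover _ hM none s hsm with ⟨t, ht, ht1, ht2⟩ | ⟨b0, hb0, -⟩
    · exact ⟨t, ht, by omega, by omega⟩
    · simp at hb0

-- head of a lex-sorted list has the least first component
theorem head_min_fst (f0 : Int × Int) (tl : List (Int × Int))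
    (h : (f0 :: tl).Pairwise lexLE) (f : Int × Int) (hf : f ∈ f0 :: tl) : f0.1 ≤ f.1 := by
  rcases List.mem_cons.mp hf with h1 | h1
  · subst h1; exact le_refl _
  · exact lexLE_fst ((List.pairwise_cons.mp h).1 f h1)

-- the main simultaneous induction
theorem loop_eq (n m : Int) (items : List (Int × Int)) :
    ∀ (U : List (Int × Int)) (d : PySem.Dict Int Int) (F : List (Int × Int)),
    U ≠ [] → d.keys.Nodup →
    (∀ k, d.get? k = smin k U none) →
    (∀ f ∈ F, f ∈ U) →
    (∀ u ∈ U, ∃ f ∈ F, f.1 ≤ u.1 ∧ f.2 ≤ u.2) →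
    F.Pairwise lexLE →
    aFin (aLoop n m items d) = bFin (bLoop n m items F) := by
  induction items with
  | nil =>
    intro U d F hU hnd hA hsub hcov hsort
    simp only [aLoop, bLoop, aFin, bFin]
    obtain ⟨u0, hu0⟩ := List.exists_mem_of_ne_nil U hU
    obtain ⟨g0, hg0, -, -⟩ := hcov u0 hu0
    cases hFc : F with
    | nil => rw [hFc] at hg0; simp at hg0
    | cons f0 tl =>
      rw [hFc] at hsub hcov hsort
      -- f0.1 is a key of d
      have hf0U : f0 ∈ U := hsub f0 List.mem_cons_self
      obtain ⟨v0, hv0⟩ := smin_total U f0.1 f0.2 (by rw [Prod.mk.eta]; exact hf0U)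
      have hg : d.get? f0.1 = some v0 := by rw [hA f0.1]; exact hv0
      have hf0k : f0.1 ∈ d.keys := by
        by_contra hc
        rw [← PySem.Dict.get?_eq_none_iff_not_mem_keys] at hc
        rw [hg] at hc
        simp at hc
      -- f0.1 is ≤ every key of d
      have hmin : ∀ k ∈ d.keys, f0.1 ≤ k := by
        intro k hk
        cases hgk : d.get? k with
        | none =>
          rw [PySem.Dict.get?_eq_none_iff_not_mem_keys] at hgk
          exact absurd hk hgk
        | some v =>
          rw [hA k] at hgk
          obtain ⟨hm, -, -⟩ := smin_spec _ _ _ _ hgk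
          rcases hm with hm | hF
          · obtain ⟨f, hf, hle1, -⟩ := hcov (k, v) hm
            have := head_min_fst f0 tl hsort f hf
            simpa using by omega
          · simp at hF
      cases hm1 : PySem.List.min? d.keys (fun k => k) with
      | none =>
        rw [PySem.List.min?_eq_none_iff] at hm1
        rw [hm1] at hf0k
        simp at hf0k
      | some w =>
        have hw1 : w ∈ d.keys := PySem.List.min?_mem hm1
        have hw2 : w ≤ f0.1 := PySem.List.min?_isMin hm1 f0.1 hf0k
        have hw3 : f0.1 ≤ w := hmin w hw1
        have : w = f0.1 := by omega
        simp [this]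
  | cons hd rest ih =>
    rcases hd with ⟨x, y⟩
    intro U d F hU hnd hA hsub hcov hsort
    have F1 : ∀ k, (aStep n m x y d).get? k = smin k (gStep n m x y U) none := by
      intro k
      unfold aStep
      rw [foldA_get?, PySem.Dict.get?_empty]
      exact gmin_formula n m x y d.items U
        (fun j => by rw [smin_items d hnd j, hA j]) k
    obtain ⟨hsub', hcov', hsort'⟩ := bStep_inv n m x y U F hsub hcov hsort
    by_cases hnil : gStep n m x y U = []
    · have ha : (aStep n m x y d).items = [] :=
        (items_nil_iff _).mpr (fun k => by rw [F1 k, hnil]; rfl)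
      have hb : bStep n m x y F = [] := by
        rw [List.eq_nil_iff_forall_not_mem]
        intro f hf
        have := hsub' f hf
        rw [hnil] at this
        simp at this
      simp [aLoop, bLoop, ha, hb, aFin, bFin]
    · have ha : (aStep n m x y d).items ≠ [] := by
        intro hc
        apply hnil
        apply states_nil_of_smin_none
        intro j
        rw [← F1 j]
        exact (items_nil_iff _).mp hc j
      have hb : bStep n m x y F ≠ [] := by
        obtain ⟨u', hu'⟩ := List.exists_mem_of_ne_nil _ hnil
        obtain ⟨f', hf', -, -⟩ := hcov' u' hu'
        exact List.ne_nil_of_mem hf'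
      have step := ih (gStep n m x y U) (aStep n m x y d) (bStep n m x y F)
        hnil (aStep_nodup n m x y d) F1 hsub' hcov' hsort'
      simpa [aLoop, bLoop, ha, hb] using step

-- ===== VERDICT (by name: the statement is the Claim_ definition above) =====
theorem solution_spec : Claim_equal_solution := by
  intro info n m _
  unfold Spec_solution solution solution_alt
  apply loop_eq n m info [((0 : Int), (0 : Int))]
  · simp
  · exact PySem.Dict.nodup_keys_ofList _
  · intro k
    rw [show PySem.Dict.ofList [((0 : Int), (0 : Int))] = PySem.Dict.empty.insert 0 0 from rfl,
      PySem.Dict.get?_insert]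
    by_cases h : k = 0
    · simp [h, smin, addMin]
    · have h' : ¬ (0 : Int) = k := fun he => h he.symm
      simp [h, h', smin, PySem.Dict.get?_empty]
  · intro f hf
    exact hf
  · intro u hu
    simp at hu
    exact ⟨(0, 0), List.mem_cons_self, by rw [hu]; simp⟩
  · simp
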